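-- pv_equiv track=rewrite | github.com/Judongsung/algorithm | 백준/Silver/1991. 트리 순회/트리 순회.py | visit_tree
-- ===== SOURCE A (Python) =====
-- FRONT = 0
--
-- MID = 1
--
-- END = 2
--
-- def visit_tree(tree, cur, mode):
--     result = ''
--     children = tree[cur]
--     if mode == FRONT:
--         result += cur
--     if children[0] != '.':
--         result += visit_tree(tree, children[0], mode)
--     if mode == MID:
--         result += cur
--     if children[1] != '.':
--         result += visit_tree(tree, children[1], mode)
--     if mode == END:
--         result += cur
--     return result
-- ===== SOURCE B (Python) =====
-- def visit_tree(tree, cur, mode):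
--     out = []
--     stack = [(True, cur)]
--     while stack:
--         is_visit, node = stack.pop()
--         if not is_visit:
--             out.append(node)
--             continue
--         children = tree[node]
--         items = []
--         if mode == 0:
--             items.append((False, node))
--         if children[0] != '.':
--             items.append((True, children[0]))
--         if mode == 1:
--             items.append((False, node))
--         if children[1] != '.':
--             items.append((True, children[1]))
--         if mode == 2:
--             items.append((False, node))
--         stack.extend(reversed(items))
--     return ''.join(out)
-- ===== Notes on version B (the rewrite author's own statement) =====
-- stated objective: alternative
-- what changed: A's recursive traversal is replaced by an iterative while-loop over an explicit stack of emit/visit work items that accumulates the node strings and joins them once, instead of building the result by recursive string concatenation.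
import Mathlib
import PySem

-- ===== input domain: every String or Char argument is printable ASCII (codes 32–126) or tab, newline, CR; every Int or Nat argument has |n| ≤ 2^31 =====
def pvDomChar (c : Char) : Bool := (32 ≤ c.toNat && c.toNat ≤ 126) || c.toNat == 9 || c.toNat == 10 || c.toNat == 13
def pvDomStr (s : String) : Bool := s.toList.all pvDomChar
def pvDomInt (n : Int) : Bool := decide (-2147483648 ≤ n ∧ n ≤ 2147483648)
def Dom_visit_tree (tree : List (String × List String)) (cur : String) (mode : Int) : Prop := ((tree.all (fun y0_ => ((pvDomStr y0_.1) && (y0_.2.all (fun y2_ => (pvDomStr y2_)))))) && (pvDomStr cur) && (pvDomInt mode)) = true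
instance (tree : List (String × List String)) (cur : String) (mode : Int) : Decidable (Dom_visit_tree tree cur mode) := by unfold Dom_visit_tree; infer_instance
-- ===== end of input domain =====

-- B replaces A's recursion by an explicit stack machine of emit/visit work items (alternative decomposition, same values).

-- ===== PORT A =====
-- shared primitive: Python's tree[k] on the association list (first match; none = KeyError)
def pyLookup (tree : List (String × List String)) (k : String) : Option (List String) :=
  match tree with
  | [] => none
  | (a, v) :: rest => if a = k then some v else pyLookup rest k

-- A's recursion, with a fuel guard that makes it total; fuel tree.length + 1 is enough on Pre_
-- (the 0 branch is unreachable there), so the port computes exactly what A computes on Pre_.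
def visitA_go (tree : List (String × List String)) (mode : Int) : Nat → String → String
  | 0, _ => ""
  | fuel+1, cur =>
    let children := (pyLookup tree cur).getD []
    let result : String := ""
    let result := if mode = 0 then result ++ cur else result
    let c0 := (PySem.List.pyGet? children 0).getD "."
    let result := if c0 ≠ "." then result ++ visitA_go tree mode fuel c0 else result
    let result := if mode = 1 then result ++ cur else result
    let c1 := (PySem.List.pyGet? children 1).getD "."
    let result := if c1 ≠ "." then result ++ visitA_go tree mode fuel c1 else result
    if mode = 2 then result ++ cur else result

def visit_tree (tree : List (String × List String)) (cur : String) (mode : Int) : String :=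
  visitA_go tree mode (tree.length + 1) cur

-- ===== PORT B =====
-- B's while-loop over the explicit stack (head = top of stack; stack.extend(reversed(items))
-- followed by pops from the end is items ++ rest here).  The fuel 2^(len+2) bounds the number of
-- loop iterations on Pre_ (proved below via costB); the 0 branch is unreachable there.
def visitB_go (tree : List (String × List String)) (mode : Int) : Nat → List (Bool × String) → List Char → List Char
  | 0, _, out => out
  | _+1, [], out => out
  | fuel+1, (false, node) :: rest, out => visitB_go tree mode fuel rest (out ++ node.toList)
  | fuel+1, (true, node) :: rest, out =>
      let children := (pyLookup tree node).getD []
      let c0 := (PySem.List.pyGet? children 0).getD "."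
      let c1 := (PySem.List.pyGet? children 1).getD "."
      let items : List (Bool × String) :=
        (if mode = 0 then [(false, node)] else []) ++
        ((if c0 ≠ "." then [(true, c0)] else []) ++
        ((if mode = 1 then [(false, node)] else []) ++
        ((if c1 ≠ "." then [(true, c1)] else []) ++
        (if mode = 2 then [(false, node)] else []))))
      visitB_go tree mode fuel (items ++ rest) out

def visit_tree_alt (tree : List (String × List String)) (cur : String) (mode : Int) : String :=
  String.ofList (visitB_go tree mode (2 ^ (tree.length + 2)) [(true, cur)] [])

-- ===== PRECONDITION & SPEC =====
def keysOf (tree : List (String × List String)) : List String := tree.map Prod.fst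

-- R is closed when it contains every non-'.' child key (among the first two) of each of its members
def closedB (tree : List (String × List String)) (R : List String) : Bool :=
  tree.all (fun e => !(R.contains e.1) ||
    (e.2.take 2).all (fun c => c == "." || !((keysOf tree).contains c) || R.contains c))

-- s is reachable from k: s lies in every closed subsequence of the keys that contains k
def reachesB (tree : List (String × List String)) (k s : String) : Bool :=
  (keysOf tree).sublists.all (fun R => !(R.contains k) || !(closedB tree R) || R.contains s)

-- Pre_ excludes exactly the inputs where A raises — start node not a key (KeyError), a reachable
-- entry with fewer than two children (IndexError), a reachable non-'.' child that is not a key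
-- (KeyError), or a cycle among reachable nodes, i.e. some reachable child reaching back to its
-- parent (RecursionError) — plus association lists with duplicate keys, which a Python dict
-- cannot represent (A's argument is a dict).
def Pre_visit_tree (tree : List (String × List String)) (cur : String) (mode : Int) : Prop :=
  (keysOf tree).Nodup ∧ cur ∈ keysOf tree ∧
  ∀ e ∈ tree, reachesB tree cur e.1 = true →
    2 ≤ e.2.length ∧
    ∀ c ∈ e.2.take 2, c ≠ "." → c ∈ keysOf tree ∧ reachesB tree c e.1 = false
instance (tree : List (String × List String)) (cur : String) (mode : Int) : Decidable (Pre_visit_tree tree cur mode) := by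
  unfold Pre_visit_tree; infer_instance

def pvWitness_visit_tree : (List (String × List String)) × String × Int :=
  ([("B", [".", "."]), ("A", ["B", "C"]), ("C", [".", "."])], "A", 1)

def Spec_visit_tree (tree : List (String × List String)) (cur : String) (mode : Int) (out : String) : Prop := out = visit_tree_alt tree cur mode
instance (tree : List (String × List String)) (cur : String) (mode : Int) (out : String) : Decidable (Spec_visit_tree tree cur mode out) := by unfold Spec_visit_tree; infer_instance

-- ===== CLAIM (what is proved, stated in full; the proofs are below) =====
def Claim_equal_visit_tree : Prop := ∀ (tree : List (String × List String)) (cur : String) (mode : Int), Dom_visit_tree tree cur mode → Pre_visit_tree tree cur mode → Spec_visit_tree tree cur mode (visit_tree tree cur mode)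

-- ===== LEMMAS AND PROOFS =====

lemma pyLookup_mem : ∀ (tree : List (String × List String)) (cur : String), cur ∈ keysOf tree →
    ∃ v, pyLookup tree cur = some v ∧ (cur, v) ∈ tree := by
  intro tree
  induction tree with
  | nil => intro cur h; simp [keysOf] at h
  | cons p rest IH =>
    intro cur h
    obtain ⟨a, v⟩ := p
    by_cases hac : a = cur
    · subst hac; exact ⟨v, by simp [pyLookup], by simp⟩
    · have hmem : cur ∈ keysOf rest := by
        simp [keysOf] at h ⊢
        rcases h with h | h
        · exact absurd h.symm hac
        · exact h
      obtain ⟨w, h1, h2⟩ := IH cur hmem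
      exact ⟨w, by simp [pyLookup, hac, h1], by simp [h2]⟩

lemma reachesB_iff (tree : List (String × List String)) (k s : String) :
    reachesB tree k s = true ↔
      ∀ R ∈ (keysOf tree).sublists, k ∈ R → closedB tree R = true → s ∈ R := by
  unfold reachesB
  rw [List.all_eq_true]
  constructor
  · intro h R hR hk hcl
    have h2 := h R hR
    rw [Bool.or_eq_true, Bool.or_eq_true, Bool.not_eq_true', Bool.not_eq_true',
        List.contains_iff_mem] at h2
    rcases h2 with (h2 | h2) | h2
    · have hx := List.contains_iff_mem.mpr hk
      rw [h2] at hx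
      simp at hx
    · exact absurd hcl (by simp [h2])
    · exact h2
  · intro h R hR
    rw [Bool.or_eq_true, Bool.or_eq_true, Bool.not_eq_true', Bool.not_eq_true',
        List.contains_iff_mem]
    by_cases hk : k ∈ R
    · by_cases hcl : closedB tree R = true
      · exact Or.inr (h R hR hk hcl)
      · exact Or.inl (Or.inr (by simpa using hcl))
    · refine Or.inl (Or.inl ?_)
      rw [Bool.eq_false_iff]
      intro hct
      exact hk (List.contains_iff_mem.mp hct)

lemma closedB_iff (tree : List (String × List String)) (R : List String) :
    closedB tree R = true ↔
      ∀ e ∈ tree, e.1 ∈ R → ∀ c ∈ e.2.take 2, c = "." ∨ c ∉ keysOf tree ∨ c ∈ R := by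
  unfold closedB
  rw [List.all_eq_true]
  constructor
  · intro h e he h1 c hc
    have h2 := h e he
    rw [Bool.or_eq_true, Bool.not_eq_true'] at h2
    rcases h2 with h2 | h2
    · have hx := List.contains_iff_mem.mpr h1
      rw [h2] at hx
      simp at hx
    · rw [List.all_eq_true] at h2
      have h3 := h2 c hc
      rw [Bool.or_eq_true, Bool.or_eq_true, Bool.not_eq_true',
          List.contains_iff_mem, beq_iff_eq] at h3
      rcases h3 with (h3 | h3) | h3
      · exact Or.inl h3
      · exact Or.inr (Or.inl (by simpa [List.contains_iff_mem] using h3))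
      · exact Or.inr (Or.inr h3)
  · intro h e he
    rw [Bool.or_eq_true, Bool.not_eq_true']
    by_cases h1 : e.1 ∈ R
    · refine Or.inr ?_
      rw [List.all_eq_true]
      intro c hc
      rw [Bool.or_eq_true, Bool.or_eq_true, Bool.not_eq_true',
          List.contains_iff_mem, beq_iff_eq]
      rcases h e he h1 c hc with h3 | h3 | h3
      · exact Or.inl (Or.inl h3)
      · exact Or.inl (Or.inr (by simpa [List.contains_iff_mem] using h3))
      · exact Or.inr h3
    · refine Or.inl ?_
      rw [Bool.eq_false_iff]
      intro hct
      exact h1 (List.contains_iff_mem.mp hct)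

lemma reaches_self (tree : List (String × List String)) (k : String) :
    reachesB tree k k = true := by
  rw [reachesB_iff]; intro R _ hk _; exact hk

lemma reaches_trans {tree : List (String × List String)} {k s t : String}
    (h1 : reachesB tree k s = true) (h2 : reachesB tree s t = true) :
    reachesB tree k t = true := by
  rw [reachesB_iff] at *
  intro R hR hk hcl
  exact h2 R hR (h1 R hR hk hcl) hcl

lemma reaches_child {tree : List (String × List String)} {cur : String} {v : List String} {c : String}
    (hkv : (cur, v) ∈ tree) (hc : c ∈ v.take 2) (hne : c ≠ ".") (hkey : c ∈ keysOf tree) :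
    reachesB tree cur c = true := by
  rw [reachesB_iff]
  intro R hR hcur hcl
  rw [closedB_iff] at hcl
  rcases hcl (cur, v) hkv hcur c hc with h | h | h
  · exact absurd h hne
  · exact absurd hkey h
  · exact h

-- the rank of a node: how many keys it reaches; strictly decreasing along edges on Pre_
def rankOf (tree : List (String × List String)) (k : String) : Nat :=
  ((keysOf tree).toFinset.filter (fun s => reachesB tree k s = true)).card

lemma rankPos {tree : List (String × List String)} {k : String} (hk : k ∈ keysOf tree) :
    1 ≤ rankOf tree k :=
  Finset.card_pos.mpr ⟨k, Finset.mem_filter.mpr ⟨List.mem_toFinset.mpr hk, reaches_self tree k⟩⟩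

lemma rankLe {tree : List (String × List String)} {k : String} :
    rankOf tree k ≤ tree.length := by
  calc rankOf tree k ≤ (keysOf tree).toFinset.card := Finset.card_filter_le _ _
    _ ≤ (keysOf tree).length := List.toFinset_card_le _
    _ = tree.length := by simp [keysOf]

lemma rankLt {tree : List (String × List String)} {cur c : String}
    (hk : cur ∈ keysOf tree) (hrc : reachesB tree cur c = true)
    (hnc : reachesB tree c cur = false) : rankOf tree c < rankOf tree cur := by
  apply Finset.card_lt_card
  rw [Finset.ssubset_def]
  constructor
  · intro s hs
    rw [Finset.mem_filter] at hs ⊢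
    exact ⟨hs.1, reaches_trans hrc hs.2⟩
  · intro hrev
    have hin : cur ∈ (keysOf tree).toFinset.filter (fun s => reachesB tree cur s = true) :=
      Finset.mem_filter.mpr ⟨List.mem_toFinset.mpr hk, reaches_self tree cur⟩
    have := Finset.mem_filter.mp (hrev hin)
    rw [hnc] at this
    exact absurd this.2 (by simp)

-- at any node reachable from the root, Pre_ supplies the exact children shape A reads
lemma node_facts {tree : List (String × List String)} {root : String}
    (hgood : ∀ e ∈ tree, reachesB tree root e.1 = true →
      2 ≤ e.2.length ∧ ∀ c ∈ e.2.take 2, c ≠ "." → c ∈ keysOf tree ∧ reachesB tree c e.1 = false)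
    {cur : String} (hc : cur ∈ keysOf tree) (hr : reachesB tree root cur = true) :
    ∃ x y vr, pyLookup tree cur = some (x :: y :: vr) ∧
      (∀ c, (c = x ∨ c = y) → c ≠ "." →
        c ∈ keysOf tree ∧ reachesB tree root c = true ∧ rankOf tree c < rankOf tree cur) := by
  obtain ⟨v, hlv, hmem⟩ := pyLookup_mem tree cur hc
  obtain ⟨h2, hch⟩ := hgood (cur, v) hmem hr
  obtain ⟨x, y, vr, hxy⟩ : ∃ x y vr, v = x :: y :: vr := by
    rcases hv : v with _ | ⟨x, _ | ⟨y, vr⟩⟩ <;> simp [hv] at h2 ⊢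
  subst hxy
  refine ⟨x, y, vr, hlv, ?_⟩
  intro c hcxy hne
  have hmem2 : c ∈ (x :: y :: vr).take 2 := by rcases hcxy with rfl | rfl <;> simp
  obtain ⟨hkc, hacyc⟩ := hch c hmem2 hne
  have hcc : reachesB tree cur c = true := reaches_child hmem hmem2 hne hkc
  exact ⟨hkc, reaches_trans hr hcc, rankLt hc hcc hacyc⟩

lemma visitA_chars {tree : List (String × List String)} {mode : Int} {cur x y : String} {vr : List String}
    (hv : pyLookup tree cur = some (x :: y :: vr)) (fuel : Nat) :
    (visitA_go tree mode (fuel+1) cur).toList =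
      (if mode = 0 then cur.toList else []) ++
      ((if x ≠ "." then (visitA_go tree mode fuel x).toList else []) ++
      ((if mode = 1 then cur.toList else []) ++
      ((if y ≠ "." then (visitA_go tree mode fuel y).toList else []) ++
      (if mode = 2 then cur.toList else [])))) := by
  have h0 : (PySem.List.pyGet? (x :: y :: vr) 0).getD "." = x := by
    rw [PySem.List.pyGet?_zero_cons]; rfl
  have h1 : (PySem.List.pyGet? (x :: y :: vr) 1).getD "." = y := by
    simp [PySem.List.pyGet?, PySem.List.pyIdx?]
  simp only [visitA_go, hv, Option.getD_some, h0, h1]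
  split_ifs <;> simp

-- A's result does not depend on the fuel once the fuel is at least rankOf tree cur
lemma visitA_stable {tree : List (String × List String)} {mode : Int} {root : String}
    (hgood : ∀ e ∈ tree, reachesB tree root e.1 = true →
      2 ≤ e.2.length ∧ ∀ c ∈ e.2.take 2, c ≠ "." → c ∈ keysOf tree ∧ reachesB tree c e.1 = false) :
    ∀ m cur, cur ∈ keysOf tree → reachesB tree root cur = true → rankOf tree cur ≤ m →
    ∀ f1 f2, rankOf tree cur ≤ f1 → rankOf tree cur ≤ f2 →
      visitA_go tree mode f1 cur = visitA_go tree mode f2 cur := by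
  intro m
  induction m with
  | zero =>
    intro cur hc _ hm
    have := rankPos hc; omega
  | succ m IH =>
    intro cur hc hr hm f1 f2 h1 h2
    have hpos : 1 ≤ rankOf tree cur := rankPos hc
    obtain ⟨g1, rfl⟩ : ∃ g, f1 = g + 1 := ⟨f1 - 1, by omega⟩
    obtain ⟨g2, rfl⟩ : ∃ g, f2 = g + 1 := ⟨f2 - 1, by omega⟩
    obtain ⟨x, y, vr, hv, hch⟩ := node_facts hgood hc hr
    refine String.toList_inj.mp ?_
    rw [visitA_chars hv g1, visitA_chars hv g2]
    have ex : (if x ≠ "." then (visitA_go tree mode g1 x).toList else []) =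
        (if x ≠ "." then (visitA_go tree mode g2 x).toList else []) := by
      split_ifs with h
      · obtain ⟨hk, hrx, hlt⟩ := hch x (Or.inl rfl) h
        rw [IH x hk hrx (by omega) g1 g2 (by omega) (by omega)]
      · rfl
    have ey : (if y ≠ "." then (visitA_go tree mode g1 y).toList else []) =
        (if y ≠ "." then (visitA_go tree mode g2 y).toList else []) := by
      split_ifs with h
      · obtain ⟨hk, hry, hlt⟩ := hch y (Or.inr rfl) h
        rw [IH y hk hry (by omega) g1 g2 (by omega) (by omega)]
      · rfl
    rw [ex, ey]

-- the number of loop iterations B needs to process a visit item for cur, with the same fuel shape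
def costB (tree : List (String × List String)) (mode : Int) : Nat → String → Nat
  | 0, _ => 0
  | fuel+1, cur =>
    let children := (pyLookup tree cur).getD []
    let c0 := (PySem.List.pyGet? children 0).getD "."
    let c1 := (PySem.List.pyGet? children 1).getD "."
    1 + ((if mode = 0 then 1 else 0) +
      ((if c0 ≠ "." then costB tree mode fuel c0 else 0) +
      ((if mode = 1 then 1 else 0) +
      ((if c1 ≠ "." then costB tree mode fuel c1 else 0) +
      (if mode = 2 then 1 else 0)))))

lemma costB_le {tree : List (String × List String)} {mode : Int} {root : String}
    (hgood : ∀ e ∈ tree, reachesB tree root e.1 = true →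
      2 ≤ e.2.length ∧ ∀ c ∈ e.2.take 2, c ≠ "." → c ∈ keysOf tree ∧ reachesB tree c e.1 = false) :
    ∀ m cur, cur ∈ keysOf tree → reachesB tree root cur = true → rankOf tree cur ≤ m →
      costB tree mode m cur + 4 ≤ 4 * 2 ^ rankOf tree cur := by
  intro m
  induction m with
  | zero =>
    intro cur hc _ hm
    have := rankPos hc; omega
  | succ m IH =>
    intro cur hc hr hm
    have hpos : 1 ≤ rankOf tree cur := rankPos hc
    obtain ⟨x, y, vr, hv, hch⟩ := node_facts hgood hc hr
    have h0 : (PySem.List.pyGet? (x :: y :: vr) 0).getD "." = x := by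
      rw [PySem.List.pyGet?_zero_cons]; rfl
    have h1 : (PySem.List.pyGet? (x :: y :: vr) 1).getD "." = y := by
      simp [PySem.List.pyGet?, PySem.List.pyIdx?]
    have hpow : 4 * 2 ^ rankOf tree cur = 2 * (4 * 2 ^ (rankOf tree cur - 1)) := by
      conv_lhs => rw [show rankOf tree cur = (rankOf tree cur - 1) + 1 from by omega]
      rw [pow_succ]; ring
    have hx : (if x ≠ "." then costB tree mode m x else 0) + 4 ≤ 4 * 2 ^ (rankOf tree cur - 1) := by
      split_ifs with h
      · obtain ⟨hk, hrx, hlt⟩ := hch x (Or.inl rfl) h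
        calc costB tree mode m x + 4 ≤ 4 * 2 ^ rankOf tree x := IH x hk hrx (by omega)
          _ ≤ 4 * 2 ^ (rankOf tree cur - 1) := by
              have := Nat.pow_le_pow_right (show 1 ≤ 2 by norm_num) (show rankOf tree x ≤ rankOf tree cur - 1 by omega)
              omega
      · have : 1 ≤ 2 ^ (rankOf tree cur - 1) := Nat.one_le_two_pow
        omega
    have hy : (if y ≠ "." then costB tree mode m y else 0) + 4 ≤ 4 * 2 ^ (rankOf tree cur - 1) := by
      split_ifs with h
      · obtain ⟨hk, hry, hlt⟩ := hch y (Or.inr rfl) h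
        calc costB tree mode m y + 4 ≤ 4 * 2 ^ rankOf tree y := IH y hk hry (by omega)
          _ ≤ 4 * 2 ^ (rankOf tree cur - 1) := by
              have := Nat.pow_le_pow_right (show 1 ≤ 2 by norm_num) (show rankOf tree y ≤ rankOf tree cur - 1 by omega)
              omega
      · have : 1 ≤ 2 ^ (rankOf tree cur - 1) := Nat.one_le_two_pow
        omega
    simp only [costB, hv, Option.getD_some, h0, h1]
    split_ifs at hx hy ⊢ <;> omega

lemma runB_emit (tree : List (String × List String)) (mode : Int) (f : Nat) (s : String)
    (st : List (Bool × String)) (out : List Char) :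
    visitB_go tree mode (1 + f) ((false, s) :: st) out = visitB_go tree mode f st (out ++ s.toList) := by
  rw [Nat.add_comm]; rfl

lemma runB_nil (tree : List (String × List String)) (mode : Int) (f : Nat) (out : List Char)
    (h : 1 ≤ f) : visitB_go tree mode f [] out = out := by
  obtain ⟨g, rfl⟩ : ∃ g, f = g + 1 := ⟨f - 1, by omega⟩
  rfl

lemma chunk_emit (tree : List (String × List String)) (mode : Int) (c : Prop) [Decidable c]
    (s : String) (f : Nat) (st : List (Bool × String)) (out : List Char) :
    visitB_go tree mode ((if c then 1 else 0) + f) ((if c then [(false, s)] else []) ++ st) out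
      = visitB_go tree mode f st (out ++ (if c then s.toList else [])) := by
  split_ifs with h
  · simpa using runB_emit tree mode f s st out
  · simp

lemma chunk_visit (tree : List (String × List String)) (mode : Int) (c : Prop) [Decidable c]
    (s : String) (C : Nat) (chs : List Char)
    (H : c → ∀ f st out, visitB_go tree mode (C + f) ((true, s) :: st) out
        = visitB_go tree mode f st (out ++ chs))
    (f : Nat) (st : List (Bool × String)) (out : List Char) :
    visitB_go tree mode ((if c then C else 0) + f) ((if c then [(true, s)] else []) ++ st) out
      = visitB_go tree mode f st (out ++ (if c then chs else [])) := by
  split_ifs with h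
  · simpa using H h f st out
  · simp

-- the main simulation: processing one visit item with its exact cost appends exactly A's output
lemma runB_visit {tree : List (String × List String)} {mode : Int} {root : String}
    (hgood : ∀ e ∈ tree, reachesB tree root e.1 = true →
      2 ≤ e.2.length ∧ ∀ c ∈ e.2.take 2, c ≠ "." → c ∈ keysOf tree ∧ reachesB tree c e.1 = false) :
    ∀ m cur, cur ∈ keysOf tree → reachesB tree root cur = true → rankOf tree cur ≤ m →
    ∀ f st out, visitB_go tree mode (costB tree mode m cur + f) ((true, cur) :: st) out
      = visitB_go tree mode f st (out ++ (visitA_go tree mode m cur).toList) := by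
  intro m
  induction m with
  | zero =>
    intro cur hc _ hm
    have := rankPos hc; omega
  | succ m IH =>
    intro cur hc hr hm f st out
    obtain ⟨x, y, vr, hv, hch⟩ := node_facts hgood hc hr
    have hbx : x ≠ "." → x ∈ keysOf tree ∧ reachesB tree root x = true ∧ rankOf tree x ≤ m :=
      fun h => by obtain ⟨hk, hrx, hlt⟩ := hch x (Or.inl rfl) h; exact ⟨hk, hrx, by omega⟩
    have hby : y ≠ "." → y ∈ keysOf tree ∧ reachesB tree root y = true ∧ rankOf tree y ≤ m :=
      fun h => by obtain ⟨hk, hry, hlt⟩ := hch y (Or.inr rfl) h; exact ⟨hk, hry, by omega⟩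
    have h0 : (PySem.List.pyGet? (x :: y :: vr) 0).getD "." = x := by
      rw [PySem.List.pyGet?_zero_cons]; rfl
    have h1 : (PySem.List.pyGet? (x :: y :: vr) 1).getD "." = y := by
      simp [PySem.List.pyGet?, PySem.List.pyIdx?]
    have hcost : costB tree mode (m+1) cur + f =
        ((if mode = 0 then 1 else 0) +
        ((if x ≠ "." then costB tree mode m x else 0) +
        ((if mode = 1 then 1 else 0) +
        ((if y ≠ "." then costB tree mode m y else 0) +
        ((if mode = 2 then 1 else 0) + f))))) + 1 := by
      simp only [costB, hv, Option.getD_some, h0, h1]; omega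
    rw [hcost]
    simp only [visitB_go, hv, Option.getD_some, h0, h1, List.append_assoc]
    rw [chunk_emit, chunk_visit tree mode (x ≠ ".") x (costB tree mode m x)
          ((visitA_go tree mode m x).toList)
          (fun h => IH x (hbx h).1 (hbx h).2.1 (hbx h).2.2),
        chunk_emit, chunk_visit tree mode (y ≠ ".") y (costB tree mode m y)
          ((visitA_go tree mode m y).toList)
          (fun h => IH y (hby h).1 (hby h).2.1 (hby h).2.2),
        chunk_emit]
    congr 1
    rw [visitA_chars hv m]
    simp [List.append_assoc]

-- ===== VERDICT (by name: the statement is the Claim_ definition above) =====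
theorem visit_tree_spec : Claim_equal_visit_tree := by
  intro tree cur mode _hdom hpre
  obtain ⟨_hnd, hc, hgood⟩ := hpre
  unfold Spec_visit_tree
  set m := rankOf tree cur with hmdef
  have hm_le : m ≤ tree.length := rankLe
  have hA : visit_tree tree cur mode = visitA_go tree mode m cur := by
    unfold visit_tree
    exact visitA_stable hgood m cur hc (reaches_self tree cur) le_rfl
      (tree.length + 1) m (by omega) le_rfl
  have hcb := costB_le (mode := mode) hgood m cur hc (reaches_self tree cur) le_rfl
  rw [← hmdef] at hcb
  have hpow : 2 ^ m ≤ 2 ^ tree.length := Nat.pow_le_pow_right (by norm_num) hm_le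
  have hfuel : costB tree mode m cur + 4 ≤ 2 ^ (tree.length + 2) := by
    have h4 : (2:ℕ) ^ (tree.length + 2) = 4 * 2 ^ tree.length := by
      rw [pow_add]; ring
    have := Nat.pow_le_pow_right (show 1 ≤ 2 by norm_num) hm_le
    omega
  set f' := 2 ^ (tree.length + 2) - costB tree mode m cur with hf'
  have hsplit : 2 ^ (tree.length + 2) = costB tree mode m cur + f' := by omega
  have hB : visit_tree_alt tree cur mode = String.ofList ((visitA_go tree mode m cur).toList) := by
    unfold visit_tree_alt
    rw [hsplit, runB_visit hgood m cur hc (reaches_self tree cur) le_rfl f' [] [],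
        runB_nil tree mode f' _ (by omega)]
    simp
  rw [hA, hB]
  simp
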